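-- pv_equiv track=rewrite | github.com/AnthonySNE/Milestone-3-Prototype-v2----Data-Sources-Prompt-Engineering | feature_2.py | filename_from_input
-- ===== SOURCE A (Python) =====
-- def filename_from_input(prompt):
--    # Remove all non-alphanumeric characters from the prompt except spaces.
--     alphanum = ""
--     for character in prompt:
--         if character.isalnum() or character == " ":
--             alphanum += character
--     # Split the alphanumeric prompt into words.
--     # Take the first five keywords if there are more than three. Else, take all    of them.
--     alphanumSplit = alphanum.split()
--     if len(alphanumSplit) > 5:
--         alphanumSplit = alphanumSplit[:5]
--     # Join the words with underscores and return the result.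
--     return "images/" + " ".join(alphanumSplit)
-- ===== SOURCE B (Python) =====
-- def filename_from_input(prompt):
--     # Single tokenizing pass: collect alphanumeric runs directly, then take the
--     # first five words.
--     words = []
--     buf = []
--     for c in prompt:
--         if c.isalnum():
--             buf.append(c)
--         elif c == ' ':
--             if buf:
--                 words.append(''.join(buf))
--                 buf = []
--         # any other character is ignored
--     if buf:
--         words.append(''.join(buf))
--     return "images/" + " ".join(words[:5])
-- ===== Notes on version B (the rewrite author's own statement) =====
-- stated objective: alternative
-- what changed: Replaces A's filter-into-string pass followed by str.split() and a conditional slice with one stateful tokenizing scan over the characters that builds the word list directly (buffer flushed on space), then takes the first five words.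
import Mathlib
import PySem

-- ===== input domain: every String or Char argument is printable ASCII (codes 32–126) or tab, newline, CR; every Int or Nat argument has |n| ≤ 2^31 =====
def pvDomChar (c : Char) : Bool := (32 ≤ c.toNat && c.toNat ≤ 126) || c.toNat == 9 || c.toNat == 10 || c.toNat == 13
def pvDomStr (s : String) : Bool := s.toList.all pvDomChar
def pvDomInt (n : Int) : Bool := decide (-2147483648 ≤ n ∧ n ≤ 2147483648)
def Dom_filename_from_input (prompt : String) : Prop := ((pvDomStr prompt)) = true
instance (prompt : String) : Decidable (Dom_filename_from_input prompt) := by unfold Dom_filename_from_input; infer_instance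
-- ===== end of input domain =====

-- B replaces A's filter-then-split()-then-slice pipeline by a single tokenizing
-- scan that builds the word list directly; same cost, different decomposition.


-- ===== PORT A =====
def filename_from_input (prompt : String) : String :=
  let alphanum : List Char :=
    prompt.toList.foldl
      (fun acc c => if PySem.Chars.isalnum c || c == ' ' then acc ++ [c] else acc) []
  let alphanumSplit := PySem.Chars.split₀ alphanum
  let alphanumSplit2 :=
    if 5 < alphanumSplit.length then PySem.List.slice alphanumSplit none (some 5)
    else alphanumSplit
  String.ofList ("images/".toList ++ PySem.Chars.join [' '] alphanumSplit2)

-- ===== PORT B =====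
-- tokenizing scan of Source B: buf is the current word, acc the words collected so far
def pvTokenize (cs : List Char) (buf : List Char) (acc : List (List Char)) :
    List (List Char) :=
  match cs with
  | [] => if buf.isEmpty then acc else acc ++ [buf]
  | c :: rest =>
    if PySem.Chars.isalnum c then pvTokenize rest (buf ++ [c]) acc
    else if c = ' ' then
      if buf.isEmpty then pvTokenize rest [] acc
      else pvTokenize rest [] (acc ++ [buf])
    else pvTokenize rest buf acc

def filename_from_input_alt (prompt : String) : String :=
  let words := pvTokenize prompt.toList [] []
  String.ofList ("images/".toList ++ PySem.Chars.join [' '] (words.take 5))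

-- ===== PRECONDITION & SPEC =====
def Spec_filename_from_input (prompt : String) (out : String) : Prop := out = filename_from_input_alt prompt
instance (prompt : String) (out : String) : Decidable (Spec_filename_from_input prompt out) := by unfold Spec_filename_from_input; infer_instance

-- ===== CLAIM (what is proved, stated in full; the proofs are below) =====
def Claim_equal_filename_from_input : Prop := ∀ (prompt : String), Dom_filename_from_input prompt → Spec_filename_from_input prompt (filename_from_input prompt)

-- ===== LEMMAS AND PROOFS =====

-- an alphanumeric character is not whitespace
theorem pv_alnum_not_space (c : Char) (h : PySem.Chars.isalnum c = true) :
    PySem.Chars.isspace c = false := by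
  revert h
  simp only [PySem.Chars.isalnum, PySem.Chars.isalpha, PySem.Chars.isdigit, PySem.Chars.isspace,
    PySem.Chars.isupper, PySem.Chars.islower, Char.le_def, UInt32.le_iff_toNat_le, Char.toNat]
  simp only [Bool.or_eq_true, Bool.and_eq_true, decide_eq_true_eq, Bool.or_eq_false_iff,
    Bool.and_eq_false_iff, decide_eq_false_iff_not, not_le]
  intro h
  rcases h with (⟨h1, h2⟩ | ⟨h1, h2⟩) | ⟨h1, h2⟩ <;> simp_all <;> omega

-- the tokenizing scan equals split₀ of the filtered characters
theorem pv_tokenize_eq_go (cs : List Char) : ∀ (buf : List Char) (acc : List (List Char)),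
    pvTokenize cs buf acc.reverse =
      PySem.Chars.split₀.go
        (cs.filter (fun c => PySem.Chars.isalnum c || c == ' ')) buf.reverse acc := by
  induction cs with
  | nil =>
    intro buf acc
    simp [pvTokenize, PySem.Chars.split₀.go, List.isEmpty_iff]
  | cons c rest ih =>
    intro buf acc
    by_cases ha : PySem.Chars.isalnum c = true
    · have hs := pv_alnum_not_space c ha
      have : buf ++ [c] = ((c :: buf.reverse).reverse) := by simp
      simp only [pvTokenize, ha, List.filter_cons,
        Bool.or_eq_true]
      simp only [true_or, if_pos, PySem.Chars.split₀.go, hs, Bool.false_eq_true, ite_false]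
      rw [show (c :: buf.reverse) = (buf ++ [c]).reverse by simp]
      exact ih (buf ++ [c]) acc
    · by_cases hsp : c = ' '
      · subst hsp
        have hs : PySem.Chars.isspace ' ' = true := by decide
        simp only [pvTokenize, ha, Bool.false_eq_true, ite_false,
          List.filter_cons, Bool.or_eq_true, beq_self_eq_true, or_true, if_pos,
          PySem.Chars.split₀.go, hs]
        by_cases hb : buf = []
        · simp [hb]
          simpa using ih [] acc
        · simp only [List.isEmpty_iff, hb, List.reverse_eq_nil_iff, ite_false]
          rw [show acc.reverse ++ [buf] = (buf :: acc).reverse by simp,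
            show (buf.reverse.reverse :: acc) = (buf :: acc) by simp]
          simpa using ih [] (buf :: acc)
      · have hc : (c == ' ') = false := by simpa using hsp
        simp only [pvTokenize, ha, Bool.false_eq_true, ite_false, hsp,
          List.filter_cons, Bool.or_eq_true, hc, or_false]
        simpa [ha] using ih buf acc

theorem pv_tokenize_eq_split₀ (cs : List Char) :
    pvTokenize cs [] [] =
      PySem.Chars.split₀ (cs.filter (fun c => PySem.Chars.isalnum c || c == ' ')) := by
  have := pv_tokenize_eq_go cs [] []
  simpa [PySem.Chars.split₀] using this

-- ===== VERDICT (by name: the statement is the Claim_ definition above) =====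
theorem filename_from_input_spec : Claim_equal_filename_from_input := by
  intro prompt _
  unfold Spec_filename_from_input filename_from_input filename_from_input_alt
  rw [show (fun (acc : List Char) (c : Char) =>
        if PySem.Chars.isalnum c || c == ' ' then acc ++ [c] else acc)
      = (fun acc c => if (fun c => PySem.Chars.isalnum c || c == ' ') c then acc ++ [id c] else acc)
      from rfl,
    PySem.List.foldl_append_if (fun c => PySem.Chars.isalnum c || c == ' ') id prompt.toList []]
  rw [List.map_id, List.nil_append, pv_tokenize_eq_split₀]
  dsimp only
  split_ifs with h
  · rw [PySem.List.slice_to _ (by norm_num)]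
    simp
  · rw [List.take_of_length_le (by omega)]
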